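-- pv_equiv track=rewrite | github.com/Pantuzzo/learning_python | 01-basics/solutions.py | transform_strings
-- ===== SOURCE A (Python) =====
-- def transform_strings(strings: list, transform: str = "upper") -> list:
--     """
--     Solução usando List Comprehension com condições.
--     """
--     if transform == "upper":
--         return [s.upper() for s in strings]
--     elif transform == "lower":
--         return [s.lower() for s in strings]
--     elif transform == "capitalize":
--         return [s.capitalize() for s in strings]
--     else:
--         return strings
-- ===== SOURCE B (Python) =====
-- def transform_strings(strings: list, transform: str = "upper") -> list:
--     """Single character-level pass: each character is case-mapped according to
--     the transform and its position (a `first` flag), instead of one whole-string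
--     method call per branch."""
--     if transform not in ("upper", "lower", "capitalize"):
--         return strings
--     result = []
--     for s in strings:
--         buf = []
--         first = True
--         for ch in s:
--             if transform == "lower" or (transform == "capitalize" and not first):
--                 buf.append(ch.lower())
--             else:
--                 buf.append(ch.upper())
--             first = False
--         result.append("".join(buf))
--     return result
-- ===== Notes on version B (the rewrite author's own statement) =====
-- stated objective: alternative
-- what changed: A branches three ways and applies a whole-string method in a comprehension per branch; B does one explicit nested loop over characters with an accumulator and a `first` flag, case-mapping each character according to the transform and its position.
import Mathlib
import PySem

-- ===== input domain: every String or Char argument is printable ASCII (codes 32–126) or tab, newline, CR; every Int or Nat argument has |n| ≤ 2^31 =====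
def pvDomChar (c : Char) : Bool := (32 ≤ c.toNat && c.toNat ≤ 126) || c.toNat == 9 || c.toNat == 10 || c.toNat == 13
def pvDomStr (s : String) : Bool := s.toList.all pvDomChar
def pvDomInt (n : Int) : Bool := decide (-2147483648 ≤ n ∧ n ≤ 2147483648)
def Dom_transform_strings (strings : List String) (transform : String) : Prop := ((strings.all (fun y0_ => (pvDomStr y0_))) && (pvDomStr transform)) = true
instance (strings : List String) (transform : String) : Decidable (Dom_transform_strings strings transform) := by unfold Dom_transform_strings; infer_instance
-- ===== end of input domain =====

-- B replaces A's three-branch whole-string method calls by one explicit nested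
-- character loop with a `first` flag; return value identical (alternative decomposition).

-- ===== PORT A =====
-- str.capitalize for ASCII strings: upper-case the first character, lower-case the rest (exact on Dom)
def pyCapitalize (s : String) : String :=
  match s.toList with
  | [] => s
  | c :: cs => String.ofList (PySem.Chars.upperChar c :: PySem.Chars.lower cs)

def transform_strings (strings : List String) (transform : String) : List String :=
  if transform == "upper" then strings.map PySem.Str.upper
  else if transform == "lower" then strings.map PySem.Str.lower
  else if transform == "capitalize" then strings.map pyCapitalize
  else strings

-- ===== PORT B =====
-- the inner character loop of Source B: one character case-mapped per step, `first` flag threaded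
def altChars (transform : String) : Bool → List Char → List Char
  | _, [] => []
  | first, c :: cs =>
      (if transform == "lower" || (transform == "capitalize" && !first)
       then PySem.Chars.lowerChar c else PySem.Chars.upperChar c) :: altChars transform false cs

def transform_strings_alt (strings : List String) (transform : String) : List String :=
  if transform == "upper" || transform == "lower" || transform == "capitalize" then
    -- the outer loop of Source B: explicit accumulator `result`
    strings.foldl (fun result s => result ++ [String.ofList (altChars transform true s.toList)]) []
  else strings

-- ===== PRECONDITION & SPEC =====
def Spec_transform_strings (strings : List String) (transform : String) (out : List String) : Prop := out = transform_strings_alt strings transform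
instance (strings : List String) (transform : String) (out : List String) : Decidable (Spec_transform_strings strings transform out) := by unfold Spec_transform_strings; infer_instance

-- ===== CLAIM (what is proved, stated in full; the proofs are below) =====
def Claim_equal_transform_strings : Prop := ∀ (strings : List String) (transform : String), Dom_transform_strings strings transform → Spec_transform_strings strings transform (transform_strings strings transform)

-- ===== LEMMAS AND PROOFS =====
theorem foldl_append_map {α β : Type} (f : α → β) (l : List α) (acc : List β) :
    l.foldl (fun r s => r ++ [f s]) acc = acc ++ l.map f := by
  induction l generalizing acc with
  | nil => simp
  | cons x xs ih => simp [List.foldl, ih]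

theorem altChars_upper (b : Bool) (cs : List Char) :
    altChars "upper" b cs = PySem.Chars.upper cs := by
  induction cs generalizing b with
  | nil => simp [altChars, PySem.Chars.upper]
  | cons c cs ih => simp [altChars, PySem.Chars.upper, ih false]

theorem altChars_lower (b : Bool) (cs : List Char) :
    altChars "lower" b cs = PySem.Chars.lower cs := by
  induction cs generalizing b with
  | nil => simp [altChars, PySem.Chars.lower]
  | cons c cs ih => simp [altChars, PySem.Chars.lower, ih false]

theorem altChars_cap_rest (cs : List Char) :
    altChars "capitalize" false cs = PySem.Chars.lower cs := by
  induction cs with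
  | nil => simp [altChars, PySem.Chars.lower]
  | cons c cs ih => simp [altChars, PySem.Chars.lower, ih]

theorem altChars_capitalize (s : String) :
    String.ofList (altChars "capitalize" true s.toList) = pyCapitalize s := by
  unfold pyCapitalize
  cases h : s.toList with
  | nil =>
      have hs : String.ofList s.toList = s := String.ofList_toList
      rw [h] at hs
      simpa [altChars] using hs
  | cons c cs => simp [altChars, altChars_cap_rest]

-- ===== VERDICT (by name: the statement is the Claim_ definition above) =====
theorem transform_strings_spec : Claim_equal_transform_strings := by
  intro strings transform _
  unfold Spec_transform_strings transform_strings transform_strings_alt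
  by_cases h1 : transform = "upper"
  · subst h1
    rw [if_pos (by decide : (("upper" : String) == "upper") = true),
        if_pos (by decide : (("upper" : String) == "upper" || "upper" == "lower" || "upper" == "capitalize") = true),
        foldl_append_map, List.nil_append]
    exact List.map_congr_left fun s _ => by simp [PySem.Str.upper, altChars_upper]
  · by_cases h2 : transform = "lower"
    · subst h2
      rw [if_neg (by decide : ¬ (("lower" : String) == "upper") = true),
          if_pos (by decide : (("lower" : String) == "lower") = true),
          if_pos (by decide : (("lower" : String) == "upper" || "lower" == "lower" || "lower" == "capitalize") = true),
          foldl_append_map, List.nil_append]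
      exact List.map_congr_left fun s _ => by simp [PySem.Str.lower, altChars_lower]
    · by_cases h3 : transform = "capitalize"
      · subst h3
        rw [if_neg (by decide : ¬ (("capitalize" : String) == "upper") = true),
            if_neg (by decide : ¬ (("capitalize" : String) == "lower") = true),
            if_pos (by decide : (("capitalize" : String) == "capitalize") = true),
            if_pos (by decide : (("capitalize" : String) == "upper" || "capitalize" == "lower" || "capitalize" == "capitalize") = true),
            foldl_append_map, List.nil_append]
        exact List.map_congr_left fun s _ => (altChars_capitalize s).symm
      · simp [h1, h2, h3]
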